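-- pv_equiv track=rewrite | github.com/kcw2297/coding_test | 프로그래머스/lvl3/imple_풍선터트리기.py | solution
-- ===== SOURCE A (Python) =====
-- def solution(a):
--     n = len(a)
--
--     # 왼쪽에서부터의 최소값을 저장할 리스트
--     left_min = [0] * n
--     left_min[0] = a[0]
--
--     for i in range(1, n):
--         # 왼쪽에서 현재 위치까지의 최소값을 저장
--         left_min[i] = min(left_min[i - 1], a[i])
--
--     # 오른쪽에서부터의 최소값을 저장할 리스트
--     right_min = [0] * n
--     right_min[-1] = a[-1]
--
--     for i in range(n - 2, -1, -1):
--         # 오른쪽에서 현재 위치까지의 최소값을 저장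
--         right_min[i] = min(right_min[i + 1], a[i])
--
--     # 살아남을 수 있는 풍선 개수 카운트
--     count = 0
--
--     for i in range(n):
--         # 현재 풍선이 왼쪽 최소값보다 작거나 혹은 오른쪽 최소값보다 작으면 최후까지 살아남을 수 있음
--         if a[i] <= left_min[i] or a[i] <= right_min[i]:
--             count += 1
--
--     return count
-- ===== SOURCE B (Python) =====
-- def solution(a):
--     alive = set()
--     m = None
--     for i, x in enumerate(a):
--         if m is None or x <= m:
--             alive.add(i)
--             m = x
--     m = None
--     for i in range(len(a) - 1, -1, -1):
--         x = a[i]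
--         if m is None or x <= m:
--             alive.add(i)
--             m = x
--     return len(alive)
-- ===== Notes on version B (the rewrite author's own statement) =====
-- stated objective: simpler
-- what changed: Replaces the two O(n) prefix/suffix-minimum arrays plus a third counting pass by two scans that keep only a scalar running minimum and collect the surviving indices into one set, returning its size.
import Mathlib
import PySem

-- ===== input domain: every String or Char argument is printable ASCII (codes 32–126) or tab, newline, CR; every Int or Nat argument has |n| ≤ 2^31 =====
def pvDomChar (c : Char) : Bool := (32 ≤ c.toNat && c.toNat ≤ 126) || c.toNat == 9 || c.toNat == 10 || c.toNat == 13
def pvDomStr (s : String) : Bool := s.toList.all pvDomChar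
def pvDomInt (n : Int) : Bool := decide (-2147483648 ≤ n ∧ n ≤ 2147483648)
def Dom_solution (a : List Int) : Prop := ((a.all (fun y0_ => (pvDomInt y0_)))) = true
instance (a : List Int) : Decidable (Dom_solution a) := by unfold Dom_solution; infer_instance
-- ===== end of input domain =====

-- B replaces A's two prefix/suffix-minimum arrays and third counting pass by two scans with a
-- scalar running minimum that collect surviving indices into one set (objective: simpler).

-- ===== PORT A =====
def solution (a : List Int) : Int :=
  let n : Int := (a.length : Int)
  let leftMin0 : List Int := List.replicate a.length 0
  let leftMin1 : List Int := PySem.List.pySetD leftMin0 0 (PySem.List.pyGetD a 0 0)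
  let leftMin : List Int := (PySem.List.pyRange 1 n 1).foldl
      (fun lm i => PySem.List.pySetD lm i
        (min (PySem.List.pyGetD lm (i - 1) 0) (PySem.List.pyGetD a i 0))) leftMin1
  let rightMin0 : List Int := List.replicate a.length 0
  let rightMin1 : List Int := PySem.List.pySetD rightMin0 (-1) (PySem.List.pyGetD a (-1) 0)
  let rightMin : List Int := (PySem.List.pyRange (n - 2) (-1) (-1)).foldl
      (fun rm i => PySem.List.pySetD rm i
        (min (PySem.List.pyGetD rm (i + 1) 0) (PySem.List.pyGetD a i 0))) rightMin1
  (PySem.List.pyRange 0 n 1).foldl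
      (fun c i => if PySem.List.pyGetD a i 0 ≤ PySem.List.pyGetD leftMin i 0 ∨
                     PySem.List.pyGetD a i 0 ≤ PySem.List.pyGetD rightMin i 0
                  then c + 1 else c) (0 : Int)

-- ===== PORT B =====
def pvNoneOrLe (m? : Option Int) (x : Int) : Bool :=
  match m? with
  | none => true
  | some m => decide (x ≤ m)

def solution_alt (a : List Int) : Int :=
  let st1 := (PySem.List.enumerate a 0).foldl
      (fun (st : PySem.Set Int × Option Int) p =>
        if pvNoneOrLe st.2 p.2 then (PySem.Set.add st.1 p.1, some p.2) else st)
      (PySem.Set.empty, none)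
  let st2 := (PySem.List.pyRange ((a.length : Int) - 1) (-1) (-1)).foldl
      (fun (st : PySem.Set Int × Option Int) i =>
        let x := PySem.List.pyGetD a i 0
        if pvNoneOrLe st.2 x then (PySem.Set.add st.1 i, some x) else st)
      (st1.1, none)
  (PySem.Set.len st2.1 : Int)

-- ===== PRECONDITION & SPEC =====
-- Pre_ excludes only the empty list, on which A raises IndexError (a[0]).
def Pre_solution (a : List Int) : Prop := a ≠ []
instance (a : List Int) : Decidable (Pre_solution a) := by unfold Pre_solution; infer_instance
def pvWitness_solution : List Int := ([1, 2] : List Int)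

def Spec_solution (a : List Int) (out : Int) : Prop := out = solution_alt a
instance (a : List Int) (out : Int) : Decidable (Spec_solution a out) := by unfold Spec_solution; infer_instance

-- ===== CLAIM (what is proved, stated in full; the proofs are below) =====
def Claim_equal_solution : Prop := ∀ (a : List Int), Dom_solution a → Pre_solution a → Spec_solution a (solution a)

-- ===== LEMMAS AND PROOFS =====


def pvPmin (a : List Int) : Nat → Int
  | 0 => a.getD 0 0
  | i+1 => min (pvPmin a i) (a.getD (i+1) 0)

def pvSminFrom : List Int → Int
  | [] => 0
  | [x] => x
  | x :: y :: xs => min x (pvSminFrom (y :: xs))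

def pvSmin (a : List Int) (i : Nat) : Int := pvSminFrom (List.drop i a)

def pvCondL (a : List Int) (i : Nat) : Bool := decide (a.getD i 0 ≤ pvPmin a i)
def pvCondR (a : List Int) (i : Nat) : Bool := decide (a.getD i 0 ≤ pvSmin a i)

lemma pvSmin_last (a : List Int) (h : a ≠ []) :
    pvSmin a (a.length - 1) = a.getD (a.length - 1) 0 := by
  have hn : 0 < a.length := List.length_pos_iff.mpr h
  rw [pvSmin, List.drop_length_sub_one h, pvSminFrom,
      List.getLast_eq_getElem, List.getD_eq_getElem _ _ (by omega)]

lemma pvSmin_step (a : List Int) (i : Nat) (h : i + 1 < a.length) :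
    pvSmin a i = min (a.getD i 0) (pvSmin a (i + 1)) := by
  have hd : List.drop i a = a[i] :: List.drop (i + 1) a :=
    List.drop_eq_getElem_cons (by omega)
  have hne : List.drop (i + 1) a ≠ [] := by
    simp [List.drop_eq_nil_iff]; omega
  obtain ⟨y, ys, hys⟩ := List.exists_cons_of_ne_nil hne
  rw [pvSmin, pvSmin, hd, hys, pvSminFrom, List.getD_eq_getElem _ _ (by omega)]

lemma pvPmin_succ' (a : List Int) (k : Nat) (h : 1 ≤ k) :
    pvPmin a k = min (pvPmin a (k - 1)) (a.getD k 0) := by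
  cases k with
  | zero => omega
  | succ k' => simp [pvPmin]

lemma pv_left_fold (a : List Int) :
    ∀ (j : Nat) (lm : List Int), j ≤ a.length - 1 → lm.length = a.length →
      (∀ i : Nat, i < a.length - j → PySem.List.pyGetD lm (i : Int) 0 = pvPmin a i) →
      ∀ i : Nat, i < a.length →
        PySem.List.pyGetD
          ((PySem.List.pyRange ((a.length - j : Nat) : Int) (a.length : Int) 1).foldl
            (fun lm i => PySem.List.pySetD lm i
              (min (PySem.List.pyGetD lm (i - 1) 0) (PySem.List.pyGetD a i 0))) lm)
          (i : Int) 0 = pvPmin a i := by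
  intro j
  induction j with
  | zero =>
    intro lm _ _ hinv i hi
    rw [PySem.List.pyRange_one_eq_nil (by omega)]
    exact hinv i (by omega)
  | succ j ih =>
    intro lm hj hlen hinv i hi
    have hk : ((a.length - (j+1) : Nat) : Int) < (a.length : Int) := by omega
    rw [PySem.List.pyRange_one_cons hk, List.foldl_cons]
    have hidx : ((a.length - (j+1) : Nat) : Int) + 1 = ((a.length - j : Nat) : Int) := by omega
    rw [hidx]
    set k : Nat := a.length - (j+1) with hkdef
    have hk1 : 1 ≤ k := by omega
    have hsub : ((k : Nat) : Int) - 1 = ((k - 1 : Nat) : Int) := by omega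
    apply ih _ (by omega) (by rw [PySem.List.length_pySetD]; exact hlen) _ i hi
    intro i' hi'
    rw [hsub, PySem.List.pyGetD_pySetD_natCast _ _ _ _ _ (by omega)]
    by_cases hik : i' = k
    · rw [if_pos hik, hinv (k - 1) (by omega), PySem.List.pyGetD_natCast, hik,
          pvPmin_succ' a k hk1]
    · rw [if_neg hik]
      exact hinv i' (by omega)

lemma pv_right_fold (a : List Int) :
    ∀ (k : Nat) (rm : List Int), k ≤ a.length - 1 → rm.length = a.length →
      (∀ j : Nat, k ≤ j → j < a.length → PySem.List.pyGetD rm (j : Int) 0 = pvSmin a j) →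
      ∀ j : Nat, j < a.length →
        PySem.List.pyGetD
          ((PySem.List.pyRange ((k : Int) - 1) (-1) (-1)).foldl
            (fun rm i => PySem.List.pySetD rm i
              (min (PySem.List.pyGetD rm (i + 1) 0) (PySem.List.pyGetD a i 0))) rm)
          (j : Int) 0 = pvSmin a j := by
  intro k
  induction k with
  | zero =>
    intro rm _ _ hinv j hj
    rw [PySem.List.pyRange_neg_one_eq_nil (by omega)]
    exact hinv j (by omega) hj
  | succ k ih =>
    intro rm hk hlen hinv j hj
    have h1 : ((k+1 : Nat) : Int) - 1 = (k : Int) := by omega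
    rw [h1, PySem.List.pyRange_neg_one_cons (by omega), List.foldl_cons]
    apply ih _ (by omega) (by rw [PySem.List.length_pySetD]; exact hlen) _ j hj
    intro j' hj' hj'n
    rw [PySem.List.pyGetD_pySetD_natCast _ _ _ _ _ (by omega)]
    by_cases hjk : j' = k
    · have h2 : ((k : Nat) : Int) + 1 = ((k + 1 : Nat) : Int) := by omega
      rw [if_pos hjk, h2, hinv (k + 1) (by omega) (by omega), PySem.List.pyGetD_natCast, hjk,
          pvSmin_step a k (by omega)]
      exact min_comm _ _
    · rw [if_neg hjk]
      exact hinv j' (by omega) hj'n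

lemma pv_solution_eq (a : List Int) (h : a ≠ []) :
    solution a = ((List.range a.length).countP (fun i => pvCondL a i || pvCondR a i) : Int) := by
  have hn : 0 < a.length := List.length_pos_iff.mpr h
  have hL1len : (PySem.List.pySetD (List.replicate a.length (0:Int)) 0 (PySem.List.pyGetD a 0 0)).length = a.length := by
    rw [PySem.List.length_pySetD, List.length_replicate]
  have hL1 : ∀ i : Nat, i < a.length - (a.length - 1) →
      PySem.List.pyGetD (PySem.List.pySetD (List.replicate a.length (0:Int)) 0 (PySem.List.pyGetD a 0 0)) (i : Int) 0 = pvPmin a i := by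
    intro i hi
    have hi0 : i = 0 := by omega
    subst hi0
    rw [Nat.cast_zero, PySem.List.pyGetD_zero,
        PySem.List.pySetD_of_nonneg (List.replicate a.length (0:Int)) (PySem.List.pyGetD a 0 0) (le_refl 0),
        PySem.List.pyGetD_zero]
    show _ = pvPmin a 0
    rw [pvPmin]
    simp [List.getD, hn]
  have hL := pv_left_fold a (a.length - 1) _ (by omega) hL1len hL1
  rw [show ((a.length - (a.length - 1) : Nat) : Int) = 1 by omega] at hL
  have hidx : PySem.List.pyIdx? a.length (-1) = some (a.length - 1) := by
    simp only [PySem.List.pyIdx?]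
    rw [if_neg (by omega), if_pos (by omega)]
    norm_num
  have hset : PySem.List.pySetD (List.replicate a.length (0:Int)) (-1) (PySem.List.pyGetD a (-1) 0)
      = (List.replicate a.length (0:Int)).set (a.length - 1) (a.getD (a.length - 1) 0) := by
    rw [PySem.List.pyGetD_neg_one a 0 h]
    simp only [PySem.List.pySetD, PySem.List.pySet?, List.length_replicate, hidx,
      Option.map_some, Option.getD_some]
    rw [List.getLast_eq_getElem, List.getD_eq_getElem _ _ (by omega)]
  have hR1len : (PySem.List.pySetD (List.replicate a.length (0:Int)) (-1) (PySem.List.pyGetD a (-1) 0)).length = a.length := by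
    rw [PySem.List.length_pySetD, List.length_replicate]
  have hlt : a.length - 1 < (List.replicate a.length (0:Int)).length := by simp; omega
  have hR1 : ∀ j : Nat, a.length - 1 ≤ j → j < a.length →
      PySem.List.pyGetD (PySem.List.pySetD (List.replicate a.length (0:Int)) (-1) (PySem.List.pyGetD a (-1) 0)) (j : Int) 0 = pvSmin a j := by
    intro j hj1 hj2
    have hj : j = a.length - 1 := by omega
    subst hj
    rw [hset, PySem.List.pyGetD_natCast, pvSmin_last a h, List.getD,
        List.getElem?_set_self (by simp; omega)]
    rfl
  have hR := pv_right_fold a (a.length - 1) _ (by omega) hR1len hR1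
  rw [show ((a.length - 1 : Nat) : Int) - 1 = (a.length : Int) - 2 by omega] at hR
  show (PySem.List.pyRange 0 (a.length : Int) 1).foldl _ 0 = _
  rw [PySem.List.pyRange_zero_nat, List.foldl_map]
  rw [PySem.List.foldl_congr_mem _ _
      (fun (c : Int) (k : Nat) => if (pvCondL a k || pvCondR a k) = true then c + 1 else c) _
      (by
        intro acc k hk
        have hkn : k < a.length := List.mem_range.mp hk
        rw [hL k hkn, hR k hkn, PySem.List.pyGetD_natCast]
        simp [pvCondL, pvCondR])]
  rw [PySem.List.foldl_count_if, zero_add]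

def pvFset (a : List Int) (k : Nat) : List Int :=
  ((List.range k).filter (fun i => pvCondL a i)).map (fun (i : Nat) => (i : Int))

lemma pv_mem_Fset (a : List Int) (k : Nat) (x : Int) :
    x ∈ pvFset a k ↔ ∃ i : Nat, i < k ∧ pvCondL a i = true ∧ x = (i : Int) := by
  simp only [pvFset, List.mem_map, List.mem_filter, List.mem_range]
  constructor
  · rintro ⟨i, ⟨hi, hc⟩, rfl⟩
    exact ⟨i, hi, hc, rfl⟩
  · rintro ⟨i, hi, hc, rfl⟩
    exact ⟨i, ⟨hi, hc⟩, rfl⟩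

lemma pv_nodup_Fset (a : List Int) (k : Nat) : (pvFset a k).Nodup := by
  refine List.Nodup.map ?_ ((List.nodup_range).filter _)
  intro x y hxy
  simpa using hxy

lemma pv_add_not_mem (s : PySem.Set Int) (x : Int) (h : x ∉ s) :
    PySem.Set.add s x = s ++ [x] := by
  unfold PySem.Set.add PySem.Set.contains
  simp [h]

lemma pv_fwd_fold (a : List Int) :
    ∀ k : Nat, k ≤ a.length →
      (List.range k).foldl
        (fun (st : PySem.Set Int × Option Int) (j : Nat) =>
          if pvNoneOrLe st.2 (PySem.List.pyGetD a (j : Int) 0)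
          then (PySem.Set.add st.1 (j : Int), some (PySem.List.pyGetD a (j : Int) 0)) else st)
        (PySem.Set.empty, none)
      = (pvFset a k, if k = 0 then none else some (pvPmin a (k - 1))) := by
  intro k
  induction k with
  | zero => simp [pvFset, PySem.Set.empty]
  | succ k ih =>
    intro hk
    rw [List.range_succ, List.foldl_append, ih (by omega), List.foldl_cons, List.foldl_nil]
    cases k with
    | zero =>
      have hcl : pvCondL a 0 = true := by
        simp [pvCondL, pvPmin]
      simp only [pvNoneOrLe, if_true]
      refine Prod.ext ?_ ?_
      · show PySem.Set.add (pvFset a 0) ((0:Nat):Int) = pvFset a 1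
        rw [pv_add_not_mem _ _ (by simp [pvFset])]
        simp [pvFset, hcl]
      · show some (PySem.List.pyGetD a ((0:Nat):Int) 0) = some (pvPmin a 0)
        rw [Nat.cast_zero, PySem.List.pyGetD_zero, pvPmin]
    | succ k' =>
      set k := k' + 1 with hkdef
      have hne : ¬ (k = 0) := by omega
      rw [if_neg hne]
      have hget : PySem.List.pyGetD a (k : Int) 0 = a.getD k 0 := PySem.List.pyGetD_natCast a k 0
      have hcl : pvCondL a k = decide (a.getD k 0 ≤ pvPmin a (k - 1)) := by
        simp [pvCondL, pvPmin_succ' a k (by omega)]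
      by_cases hc : a.getD k 0 ≤ pvPmin a (k - 1)
      · have hclt : pvCondL a k = true := by rw [hcl]; exact decide_eq_true hc
        rw [if_pos (by simp only [pvNoneOrLe, hget, decide_eq_true_eq]; exact hc)]
        refine Prod.ext ?_ ?_
        · show PySem.Set.add (pvFset a k) (k : Int) = pvFset a (k + 1)
          rw [pv_add_not_mem _ _ (by
            rw [pv_mem_Fset]
            rintro ⟨i, hi, -, hcast⟩
            have : i = k := by exact_mod_cast hcast.symm
            omega)]
          simp [pvFset, List.range_succ, List.filter_append, hclt]
        · show some (PySem.List.pyGetD a (k : Int) 0) = some (pvPmin a (k + 1 - 1))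
          rw [hget]
          simp only [Nat.add_sub_cancel]
          rw [pvPmin_succ' a k (by omega), min_eq_right hc]
      · have hclf : pvCondL a k = false := by rw [hcl, decide_eq_false_iff_not]; exact hc
        rw [if_neg (by simp only [pvNoneOrLe, hget, decide_eq_true_eq]; exact hc)]
        refine Prod.ext ?_ ?_
        · show pvFset a k = pvFset a (k + 1)
          simp [pvFset, List.range_succ, List.filter_append, hclf]
        · show some (pvPmin a (k - 1)) = some (pvPmin a (k + 1 - 1))
          simp only [Nat.add_sub_cancel]
          rw [pvPmin_succ' a k (by omega), min_eq_left (not_le.mp hc).le]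

def pvBwdStep (a : List Int) (st : PySem.Set Int × Option Int) (i : Int) :
    PySem.Set Int × Option Int :=
  if pvNoneOrLe st.2 (PySem.List.pyGetD a i 0)
  then (PySem.Set.add st.1 i, some (PySem.List.pyGetD a i 0)) else st

lemma pvCondR_true_last (a : List Int) (h : a ≠ []) : pvCondR a (a.length - 1) = true := by
  simp [pvCondR, pvSmin_last a h]

lemma pv_bwd_fold (a : List Int) (h : a ≠ []) :
    ∀ (k : Nat), k ≤ a.length →
    ∀ (S : List Int), S.Nodup →
      (∀ x : Int, x ∈ S ↔ x ∈ pvFset a a.length ∨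
        ∃ j : Nat, k ≤ j ∧ j < a.length ∧ pvCondR a j = true ∧ x = (j : Int)) →
      ((PySem.List.pyRange ((k : Int) - 1) (-1) (-1)).foldl (pvBwdStep a)
        (S, if k = a.length then none else some (pvSmin a k))).1.Nodup ∧
      (∀ x : Int, x ∈ ((PySem.List.pyRange ((k : Int) - 1) (-1) (-1)).foldl (pvBwdStep a)
        (S, if k = a.length then none else some (pvSmin a k))).1 ↔
        x ∈ pvFset a a.length ∨
        ∃ j : Nat, j < a.length ∧ pvCondR a j = true ∧ x = (j : Int)) := by
  intro k
  induction k with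
  | zero =>
    intro _ S hnd hmem
    rw [PySem.List.pyRange_neg_one_eq_nil (by omega)]
    refine ⟨hnd, fun x => (hmem x).trans ?_⟩
    simp
  | succ k ih =>
    intro hk S hnd hmem
    have h1 : ((k+1 : Nat) : Int) - 1 = (k : Int) := by omega
    rw [h1, PySem.List.pyRange_neg_one_cons (by omega), List.foldl_cons]
    have hget : PySem.List.pyGetD a (k : Int) 0 = a.getD k 0 := PySem.List.pyGetD_natCast a k 0
    by_cases hkn : k + 1 = a.length
    · -- first processed index: n - 1, m is none, condition holds
      have hk1 : k = a.length - 1 := by omega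
      have hcrt : pvCondR a k = true := by rw [hk1]; exact pvCondR_true_last a h
      have hstep : pvBwdStep a (S, if k + 1 = a.length then none else some (pvSmin a (k+1))) (k : Int)
          = (PySem.Set.add S (k : Int), some (pvSmin a k)) := by
        rw [if_pos hkn]
        unfold pvBwdStep
        simp only [pvNoneOrLe, if_true]
        rw [hget, hk1, pvSmin_last a h]
      rw [hstep,
        show (some (pvSmin a k) : Option Int) = if k = a.length then none else some (pvSmin a k)
          from (if_neg (by omega)).symm]
      refine ih (by omega) _ (PySem.Set.nodup_add S (k : Int) hnd) ?_
      · -- membership hypothesis after adding k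
        intro x
        rw [PySem.Set.mem_add, hmem x]
        constructor
        · rintro ((hF | ⟨j, hj1, hj2, hj3, rfl⟩) | rfl)
          · exact Or.inl hF
          · exact Or.inr ⟨j, by omega, hj2, hj3, rfl⟩
          · exact Or.inr ⟨k, by omega, by omega, hcrt, rfl⟩
        · rintro (hF | ⟨j, hj1, hj2, hj3, rfl⟩)
          · exact Or.inl (Or.inl hF)
          · by_cases hjk : j = k
            · subst hjk; exact Or.inr rfl
            · exact Or.inl (Or.inr ⟨j, by omega, hj2, hj3, rfl⟩)
    · -- k + 1 < n : m is some (pvSmin a (k+1))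
      have hkn' : k + 1 < a.length := by omega
      have hks : pvSmin a k = min (a.getD k 0) (pvSmin a (k + 1)) := pvSmin_step a k hkn'
      by_cases hc : a.getD k 0 ≤ pvSmin a (k + 1)
      · have hcrt : pvCondR a k = true := by
          simp [pvCondR, hks]
          exact hc
        have hstep : pvBwdStep a (S, if k + 1 = a.length then none else some (pvSmin a (k+1))) (k : Int)
            = (PySem.Set.add S (k : Int), some (pvSmin a k)) := by
          rw [if_neg hkn]
          unfold pvBwdStep
          rw [if_pos (by simp only [pvNoneOrLe, hget, decide_eq_true_eq]; exact hc)]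
          rw [hget, hks, min_eq_left hc]
        rw [hstep,
          show (some (pvSmin a k) : Option Int) = if k = a.length then none else some (pvSmin a k)
            from (if_neg (by omega)).symm]
        refine ih (by omega) _ (PySem.Set.nodup_add S (k : Int) hnd) ?_
        intro x
        rw [PySem.Set.mem_add, hmem x]
        constructor
        · rintro ((hF | ⟨j, hj1, hj2, hj3, rfl⟩) | rfl)
          · exact Or.inl hF
          · exact Or.inr ⟨j, by omega, hj2, hj3, rfl⟩
          · exact Or.inr ⟨k, by omega, by omega, hcrt, rfl⟩
        · rintro (hF | ⟨j, hj1, hj2, hj3, rfl⟩)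
          · exact Or.inl (Or.inl hF)
          · by_cases hjk : j = k
            · subst hjk; exact Or.inr rfl
            · exact Or.inl (Or.inr ⟨j, by omega, hj2, hj3, rfl⟩)
      · have hcrf : pvCondR a k = false := by
          rw [pvCondR, decide_eq_false_iff_not, hks, le_min_iff]
          rintro ⟨-, h2⟩
          exact hc h2
        have hmeq : pvSmin a k = pvSmin a (k + 1) := by
          rw [hks, min_eq_right (not_le.mp hc).le]
        have hstep : pvBwdStep a (S, if k + 1 = a.length then none else some (pvSmin a (k+1))) (k : Int)
            = (S, some (pvSmin a (k+1))) := by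
          rw [if_neg hkn]
          unfold pvBwdStep
          rw [if_neg (by simp only [pvNoneOrLe, hget, decide_eq_true_eq]; exact hc)]
        rw [hstep, ← hmeq,
          show (some (pvSmin a k) : Option Int) = if k = a.length then none else some (pvSmin a k)
            from (if_neg (by omega)).symm]
        refine ih (by omega) _ hnd ?_
        intro x
        rw [hmem x]
        constructor
        · rintro (hF | ⟨j, hj1, hj2, hj3, rfl⟩)
          · exact Or.inl hF
          · exact Or.inr ⟨j, by omega, hj2, hj3, rfl⟩
        · rintro (hF | ⟨j, hj1, hj2, hj3, rfl⟩)
          · exact Or.inl hF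
          · by_cases hjk : j = k
            · subst hjk
              rw [hcrf] at hj3
              cases hj3
            · exact Or.inr ⟨j, by omega, hj2, hj3, rfl⟩

lemma pv_solution_alt_eq (a : List Int) (h : a ≠ []) :
    solution_alt a = ((List.range a.length).countP (fun i => pvCondL a i || pvCondR a i) : Int) := by
  have hn : 0 < a.length := List.length_pos_iff.mpr h
  have hfwd : (PySem.List.enumerate a 0).foldl
      (fun (st : PySem.Set Int × Option Int) p =>
        if pvNoneOrLe st.2 p.2 then (PySem.Set.add st.1 p.1, some p.2) else st)
      (PySem.Set.empty, none)
      = (pvFset a a.length, if a.length = 0 then none else some (pvPmin a (a.length - 1))) := by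
    rw [PySem.List.enumerate_eq_map_pyRange a 0, PySem.List.len_eq, PySem.List.pyRange_zero_nat,
        List.map_map]
    rw [List.foldl_map]
    exact pv_fwd_fold a a.length le_rfl
  have hmem0 : ∀ x : Int, x ∈ pvFset a a.length ↔ x ∈ pvFset a a.length ∨
      ∃ j : Nat, a.length ≤ j ∧ j < a.length ∧ pvCondR a j = true ∧ x = (j : Int) := by
    intro x
    constructor
    · exact Or.inl
    · rintro (hF | ⟨j, hj1, hj2, -, -⟩)
      · exact hF
      · omega
  have hbwd := pv_bwd_fold a h a.length le_rfl (pvFset a a.length)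
      (pv_nodup_Fset a a.length) hmem0
  rw [if_pos rfl] at hbwd
  obtain ⟨hndR, hmemR⟩ := hbwd
  have hT : ∀ x : Int, x ∈ ((List.range a.length).filter
        (fun i => pvCondL a i || pvCondR a i)).map (fun (i : Nat) => (i : Int)) ↔
      ∃ i : Nat, i < a.length ∧ (pvCondL a i || pvCondR a i) = true ∧ x = (i : Int) := by
    intro x
    rw [List.mem_map]
    constructor
    · rintro ⟨i, hmem, rfl⟩
      rw [List.mem_filter, List.mem_range] at hmem
      exact ⟨i, hmem.1, hmem.2, rfl⟩
    · rintro ⟨i, hi, hc, rfl⟩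
      exact ⟨i, List.mem_filter.mpr ⟨List.mem_range.mpr hi, hc⟩, rfl⟩
  have hTnd : (((List.range a.length).filter
      (fun i => pvCondL a i || pvCondR a i)).map (fun (i : Nat) => (i : Int))).Nodup := by
    refine List.Nodup.map ?_ ((List.nodup_range).filter _)
    intro x y hxy
    simpa using hxy
  have hperm : ((PySem.List.pyRange (((a.length : Nat) : Int) - 1) (-1) (-1)).foldl (pvBwdStep a)
        (pvFset a a.length, none)).1.Perm
      (((List.range a.length).filter (fun i => pvCondL a i || pvCondR a i)).map
        (fun (i : Nat) => (i : Int))) := by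
    rw [List.perm_ext_iff_of_nodup hndR hTnd]
    intro x
    rw [hmemR x, hT x, pv_mem_Fset]
    constructor
    · rintro (⟨i, hi, hc, rfl⟩ | ⟨j, hj, hc, rfl⟩)
      · exact ⟨i, hi, by rw [hc]; rfl, rfl⟩
      · exact ⟨j, hj, by rw [hc, Bool.or_true], rfl⟩
    · rintro ⟨i, hi, hc, rfl⟩
      rcases Bool.or_eq_true_iff.mp hc with h1 | h1
      · exact Or.inl ⟨i, hi, h1, rfl⟩
      · exact Or.inr ⟨i, hi, h1, rfl⟩
  simp only [solution_alt]
  rw [hfwd]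
  show PySem.Set.len ((PySem.List.pyRange (((a.length : Nat) : Int) - 1) (-1) (-1)).foldl
      (pvBwdStep a) (pvFset a a.length, none)).1 = _
  unfold PySem.Set.len
  rw [hperm.length_eq, List.length_map, List.countP_eq_length_filter]

-- ===== VERDICT (by name: the statement is the Claim_ definition above) =====
theorem solution_spec : Claim_equal_solution := by
  intro a _ hp
  unfold Spec_solution
  rw [pv_solution_eq a hp, pv_solution_alt_eq a hp]
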